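-- pv_equiv track=rewrite | github.com/Misskesite/Leetcode | 313superUglynumber.py | superUglynumber
-- ===== SOURCE A (Python) =====
-- import heapq
-- import heapq
--
-- def superUglynumber(n, primes):
--     if not primes:
--         return
--     uglies = [1]
--     def gen(prime):
--         for ugly in uglies:
--             yield ugly*prime
--
--     merged = heapq.merge(*map(gen, primes))
--     while len(uglies) < n:
--         ugly = next(merged)
--         if ugly != uglies[-1]:
--             uglies.append(ugly)
--     return uglies[-1]
-- ===== SOURCE B (Python) =====
-- def superUglynumber(n, primes):
--     if not primes:
--         return
--     # explicit k-way merge: parallel arrays of live primes and per-stream positions,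
--     # linear scan for the minimal candidate, advance / drop that stream, dedupe on append
--     uglies = [1]
--     live = list(primes)
--     pos = [0] * len(live)
--     while len(uglies) < n and live:
--         cands = [uglies[pos[i]] * live[i] for i in range(len(live))]
--         m = min(cands)
--         j = cands.index(m)
--         if m != uglies[-1]:
--             uglies.append(m)
--         pos[j] += 1
--         if pos[j] >= len(uglies):
--             del live[j]
--             del pos[j]
--     return uglies[-1]
-- ===== Notes on version B (the rewrite author's own statement) =====
-- stated objective: alternative
-- what changed: A merges the k multiplied streams through heapq.merge over lazy generators; B materialises the merge explicitly on parallel arrays (live primes + per-stream positions), scanning linearly for the minimal candidate, advancing or dropping that one stream in place and deduplicating against the last element - no heap, no generator protocol, and the same return value wherever A returns.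
-- outside the precondition, e.g. on superUglynumber(0, []): A returns None, B returns None; on superUglynumber(3, [2, 1]): A returns 4, B returns 4; on superUglynumber(2, [1]): A raises StopIteration, B returns 1
import Mathlib
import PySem

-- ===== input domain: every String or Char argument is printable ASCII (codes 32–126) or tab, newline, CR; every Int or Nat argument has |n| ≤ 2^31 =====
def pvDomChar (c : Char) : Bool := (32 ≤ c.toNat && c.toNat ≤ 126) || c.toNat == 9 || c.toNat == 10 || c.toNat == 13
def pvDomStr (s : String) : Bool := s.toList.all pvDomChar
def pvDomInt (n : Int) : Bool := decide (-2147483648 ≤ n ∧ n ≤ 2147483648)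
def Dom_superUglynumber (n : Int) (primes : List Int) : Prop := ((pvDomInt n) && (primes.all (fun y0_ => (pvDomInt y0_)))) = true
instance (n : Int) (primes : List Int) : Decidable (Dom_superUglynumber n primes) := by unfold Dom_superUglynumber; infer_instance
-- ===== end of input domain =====

-- B replaces A's heapq.merge over k lazy generators by an explicit k-way merge on parallel
-- arrays (live primes + per-stream positions, linear min scan, in-place advance and stream
-- removal): no heap, no generators; same return value wherever A returns.

-- ===== PORT A =====
-- A drives heapq.merge over k generators that lazily multiply the growing `uglies` list.
-- The port models merge's contract exactly: one frontier entry (value, prime, index) per live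
-- stream; each next() pops the leftmost minimal value (heapq.merge breaks value ties by
-- stream order) and then advances that stream over the current (possibly grown) list,
-- dropping the stream when its generator ends.  `fuel` only bounds the while-loop's
-- iterations (each iteration advances or drops a stream, and no stream index passes n).
def pvPickMin : List (Int × Int × Nat) → Option ((Int × Int × Nat) × Nat)
  | [] => none
  | e :: rest =>
    match pvPickMin rest with
    | none => some (e, 0)
    | some (e', j) => if e.1 ≤ e'.1 then some (e, 0) else some (e', j + 1)

def pvALoop (n : Int) : Nat → List Int → List (Int × Int × Nat) → Int
  | 0, uglies, _ => uglies.getLastD 0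
  | fuel + 1, uglies, front =>
    if (uglies.length : Int) < n then
      match pvPickMin front with
      | none => uglies.getLastD 0   -- next(merged) raises StopIteration (outside Pre_)
      | some ((v, p, i), j) =>
        let uglies' := if v ≠ uglies.getLastD 0 then uglies ++ [v] else uglies
        let front' :=
          if i + 1 < uglies'.length then front.set j (uglies'.getD (i + 1) 0 * p, p, i + 1)
          else front.eraseIdx j
        pvALoop n fuel uglies' front'
    else uglies.getLastD 0

def superUglynumber (n : Int) (primes : List Int) : Int :=
  if primes = [] then 0   -- Python A returns None here (excluded by Pre_)
  else pvALoop n (n.toNat * primes.length + primes.length + 1) [1]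
         (primes.map fun p => (1 * p, p, 0))

-- ===== PORT B =====
def pvBLoop (n : Int) : Nat → List Int → List Int → List Nat → Int
  | 0, uglies, _, _ => uglies.getLastD 0
  | fuel + 1, uglies, live, pos =>
    if (uglies.length : Int) < n ∧ live ≠ [] then
      let cands := List.zipWith (fun p i => uglies.getD i 0 * p) live pos
      let m := (PySem.List.min? cands (fun x => x)).getD 0
      let j := cands.idxOf m
      let uglies' := if m ≠ uglies.getLastD 0 then uglies ++ [m] else uglies
      let pos' := pos.set j (pos.getD j 0 + 1)
      if uglies'.length ≤ pos'.getD j 0 then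
        pvBLoop n fuel uglies' (live.eraseIdx j) (pos'.eraseIdx j)
      else
        pvBLoop n fuel uglies' live pos'
    else uglies.getLastD 0

def superUglynumber_alt (n : Int) (primes : List Int) : Int :=
  if primes = [] then 0   -- Python B returns None here (excluded by Pre_)
  else pvBLoop n (n.toNat * primes.length + primes.length + 1) [1] primes
         (primes.map fun _ => 0)

-- ===== PRECONDITION & SPEC =====
-- Pre_ excludes empty primes (A returns None, not an int) and, when n ≥ 2, prime lists with
-- an entry below 2: there A's lazily merged streams can exhaust mid-run, so A raises
-- StopIteration on an input-dependent subset with no closed form; Pre_ conservatively keeps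
-- only the inputs on which A is sure to return (B returns A's value on the excluded inputs
-- too whenever A returns there).
def Pre_superUglynumber (n : Int) (primes : List Int) : Prop :=
  primes ≠ [] ∧ (n ≤ 1 ∨ ∀ p ∈ primes, 2 ≤ p)
instance (n : Int) (primes : List Int) : Decidable (Pre_superUglynumber n primes) := by
  unfold Pre_superUglynumber; infer_instance

def pvWitness_superUglynumber : Int × List Int := (6, [2, 7, 13, 19])

def Spec_superUglynumber (n : Int) (primes : List Int) (out : Int) : Prop := out = superUglynumber_alt n primes
instance (n : Int) (primes : List Int) (out : Int) : Decidable (Spec_superUglynumber n primes out) := by unfold Spec_superUglynumber; infer_instance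

-- ===== CLAIM (what is proved, stated in full; the proofs are below) =====
def Claim_equal_superUglynumber : Prop := ∀ (n : Int) (primes : List Int), Dom_superUglynumber n primes → Pre_superUglynumber n primes → Spec_superUglynumber n primes (superUglynumber n primes)

-- ===== LEMMAS AND PROOFS =====

-- the coupling between the two loop states: A's cached frontier entry for stream k is
-- (uglies[pos k] * live k, live k, pos k)
def pvFront (uglies live : List Int) (pos : List Nat) : List (Int × Int × Nat) :=
  List.zipWith (fun p i => (uglies.getD i 0 * p, p, i)) live pos

theorem pvPickMin_spec (f : List (Int × Int × Nat)) (e : Int × Int × Nat) (j : Nat)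
    (h : pvPickMin f = some (e, j)) :
    ∃ hj : j < f.length, f[j] = e ∧ ∀ e' ∈ f, e.1 ≤ e'.1 := by
  induction f generalizing e j with
  | nil => simp [pvPickMin] at h
  | cons a rest ih =>
    simp only [pvPickMin] at h
    cases hrest : pvPickMin rest with
    | none =>
      rw [hrest] at h
      have hre : rest = [] := by
        cases rest with
        | nil => rfl
        | cons b u =>
          exfalso
          simp only [pvPickMin] at hrest
          cases h' : pvPickMin u with
          | none => rw [h'] at hrest; simp at hrest
          | some x =>
            rw [h'] at hrest
            obtain ⟨e'', j''⟩ := x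
            by_cases hb : b.1 ≤ e''.1 <;> simp [hb] at hrest
      subst hre
      simp at h
      obtain ⟨rfl, rfl⟩ := h
      exact ⟨by simp, by simp⟩
    | some x =>
      obtain ⟨e', j'⟩ := x
      rw [hrest] at h
      obtain ⟨hj', hget', hmin'⟩ := ih e' j' hrest
      by_cases hle : a.1 ≤ e'.1
      · simp [hle] at h
        obtain ⟨rfl, rfl⟩ := h
        refine ⟨by simp, by simp, ?_⟩
        intro e'' he''
        rcases List.mem_cons.1 he'' with rfl | hm
        · exact le_refl _
        · exact le_trans hle (hmin' _ hm)
      · simp [hle] at h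
        obtain ⟨rfl, rfl⟩ := h
        refine ⟨by simpa using Nat.succ_lt_succ hj', by simpa using hget', ?_⟩
        intro e'' he''
        rcases List.mem_cons.1 he'' with rfl | hm
        · exact le_of_lt (lt_of_not_ge hle)
        · exact hmin' _ hm

theorem pvPickMin_leftmost (f : List (Int × Int × Nat)) (e : Int × Int × Nat) (j : Nat)
    (h : pvPickMin f = some (e, j)) :
    ∀ j' (hj' : j' < f.length), j' < j → e.1 < f[j'].1 := by
  induction f generalizing e j with
  | nil => simp [pvPickMin] at h
  | cons a rest ih =>
    simp only [pvPickMin] at h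
    cases hrest : pvPickMin rest with
    | none =>
      rw [hrest] at h
      simp at h
      obtain ⟨rfl, rfl⟩ := h
      intro j' _ hj'
      omega
    | some x =>
      obtain ⟨e', j'⟩ := x
      rw [hrest] at h
      by_cases hle : a.1 ≤ e'.1
      · simp [hle] at h
        obtain ⟨rfl, rfl⟩ := h
        intro j'' _ hj''
        omega
      · simp [hle] at h
        obtain ⟨rfl, rfl⟩ := h
        intro j'' hj'' hlt
        cases j'' with
        | zero => simpa using lt_of_not_ge hle
        | succ j3 =>
          have := ih e' j' hrest j3 (by simpa using hj'') (by omega)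
          simpa using this

theorem pvPickMin_ne_none (f : List (Int × Int × Nat)) (h : f ≠ []) :
    pvPickMin f ≠ none := by
  cases f with
  | nil => exact absurd rfl h
  | cons a rest =>
    simp only [pvPickMin]
    cases h' : pvPickMin rest with
    | none => simp
    | some x => obtain ⟨e', j'⟩ := x; by_cases hb : a.1 ≤ e'.1 <;> simp [hb]

theorem pvIdxOf_eq (l : List Int) (x : Int) (j : Nat) (hj : j < l.length)
    (hx : l[j] = x) (hlt : ∀ j' (hj' : j' < l.length), j' < j → l[j'] ≠ x) :
    l.idxOf x = j := by
  induction l generalizing j with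
  | nil => simp at hj
  | cons a t ih =>
    cases j with
    | zero =>
      simp at hx
      simp [hx]
    | succ j' =>
      have ha : a ≠ x := by
        have := hlt 0 (by simp) (by omega)
        simpa using this
      rw [List.idxOf_cons]
      have hbeq : (a == x) = false := by simpa using ha
      rw [hbeq]
      simp only [cond_false]
      have := ih j' (by simpa using hj) (by simpa using hx)
        (fun j'' hj'' hlt' => by simpa using hlt (j'' + 1) (by simpa using hj'') (by omega))
      omega

theorem pvGetD_concat_lt (l : List Int) (x : Int) (jj : Nat) (h : jj < l.length) :
    (l ++ [x]).getD jj 0 = l.getD jj 0 := by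
  rw [List.getD_eq_getElem _ _ (by simp; omega), List.getD_eq_getElem _ _ h]
  exact List.getElem_append_left h

theorem pvZipWith_set_right {α β γ : Type} (f : α → β → γ) (l : List α) (q : List β)
    (j : Nat) (b : β) (hjl : j < l.length) :
    List.zipWith f l (q.set j b) =
      (List.zipWith f l q).set j (f (l[j]'hjl) b) := by
  induction l generalizing q j with
  | nil => simp at hjl
  | cons a t ih =>
    cases q with
    | nil => simp
    | cons c u =>
      cases j with
      | zero => simp
      | succ j' =>
        simp only [List.zipWith_cons_cons, List.getElem_cons_succ]
        rw [show (c :: u).set (j' + 1) b = c :: u.set j' b from rfl,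
          List.zipWith_cons_cons, ih u j' (by simpa using hjl)]
        rfl

theorem pvZipWith_eraseIdx {α β γ : Type} (f : α → β → γ) (l : List α) (q : List β)
    (j : Nat) :
    List.zipWith f (l.eraseIdx j) (q.eraseIdx j) = (List.zipWith f l q).eraseIdx j := by
  induction l generalizing q j with
  | nil => simp
  | cons a t ih =>
    cases q with
    | nil => simp
    | cons c u =>
      cases j with
      | zero => simp
      | succ j' =>
        simp only [List.eraseIdx_cons_succ, List.zipWith_cons_cons]
        rw [ih u j']

theorem pvSet_eraseIdx {β : Type} (q : List β) (j : Nat) (b : β) :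
    (q.set j b).eraseIdx j = q.eraseIdx j := by
  induction q generalizing j with
  | nil => simp
  | cons c u ih =>
    cases j with
    | zero => simp
    | succ j' =>
      simp only [List.set_cons_succ, List.eraseIdx_cons_succ]
      rw [ih j']

theorem pvFront_congr (u u' live : List Int) (pos : List Nat)
    (h : ∀ i ∈ pos, u'.getD i 0 = u.getD i 0) :
    pvFront u' live pos = pvFront u live pos := by
  induction live generalizing pos with
  | nil => simp [pvFront]
  | cons a t ih =>
    cases pos with
    | nil => simp [pvFront]
    | cons i q =>
      simp only [pvFront, List.zipWith_cons_cons] at *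
      rw [h i (by simp), ih q (fun i' hi' => h i' (by simp [hi']))]

theorem pvFront_init (primes u : List Int) :
    pvFront u primes (primes.map fun _ => 0) =
      primes.map fun p => (u.getD 0 0 * p, p, 0) := by
  induction primes with
  | nil => simp [pvFront]
  | cons a t ih =>
    simp only [pvFront, List.map_cons, List.zipWith_cons_cons] at *
    rw [ih]

-- the bisimulation: A's heap-merge loop and B's scan-merge loop stay in lockstep
theorem pvLoop_bisim (n : Int) :
    ∀ (fuel : Nat) (uglies live : List Int) (pos : List Nat),
      pos.length = live.length →
      (∀ i ∈ pos, i < uglies.length) →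
      pvALoop n fuel uglies (pvFront uglies live pos) = pvBLoop n fuel uglies live pos := by
  intro fuel
  induction fuel with
  | zero => intro uglies live pos _ _; rfl
  | succ fuel ih =>
    intro uglies live pos hlen hbound
    by_cases hn : (uglies.length : Int) < n
    · cases live with
      | nil =>
        have hpos : pos = [] := by cases pos <;> simp_all
        subst hpos
        simp [pvALoop, pvBLoop, pvFront, hn, pvPickMin]
      | cons q lt =>
        have hfl : (pvFront uglies (q :: lt) pos).length = pos.length := by
          simp [pvFront, hlen]
        have hfne : pvFront uglies (q :: lt) pos ≠ [] := by
          intro hc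
          have := congrArg List.length hc
          rw [hfl, hlen] at this
          simp at this
        cases hpick : pvPickMin (pvFront uglies (q :: lt) pos) with
        | none => exact absurd hpick (pvPickMin_ne_none _ hfne)
        | some x =>
          obtain ⟨⟨v, p, i⟩, j⟩ := x
          obtain ⟨hj, hget, hmin⟩ := pvPickMin_spec _ _ _ hpick
          have hjp : j < pos.length := by omega
          have hjl : j < (q :: lt).length := by omega
          -- decode the popped entry through the coupling
          have hentry : (v, p, i) =
              (uglies.getD (pos[j]'hjp) 0 * ((q :: lt)[j]'hjl), (q :: lt)[j]'hjl,
                pos[j]'hjp) := by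
            rw [← hget]
            simp [pvFront]
          have hp : (q :: lt)[j]'hjl = p := by
            have := congrArg (fun e => e.2.1) hentry
            simpa using this.symm
          have hi : pos[j]'hjp = i := by
            have := congrArg (fun e => e.2.2) hentry
            simpa using this.symm
          -- B picks the same value ...
          have hmapc : (pvFront uglies (q :: lt) pos).map (fun e => e.1) =
              List.zipWith (fun p i => uglies.getD i 0 * p) (q :: lt) pos := by
            simp [pvFront, List.map_zipWith]
          have hclen : j < (List.zipWith (fun p i => uglies.getD i 0 * p) (q :: lt) pos).length := by
            rw [← hmapc]
            simpa using hj
          have hcj : ∀ (j' : Nat) (hj' : j' < (List.zipWith (fun p i => uglies.getD i 0 * p) (q :: lt) pos).length),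
              (List.zipWith (fun p i => uglies.getD i 0 * p) (q :: lt) pos)[j'] =
              ((pvFront uglies (q :: lt) pos)[j']'(by
                simp only [pvFront, List.length_zipWith] at hj' ⊢; exact hj')).1 := by
            intro j' hj'
            rw [List.getElem_of_eq hmapc.symm hj']
            simp
          have hvc : (List.zipWith (fun p i => uglies.getD i 0 * p) (q :: lt) pos)[j] = v := by
            rw [hcj j hclen, hget]
          have hm : (PySem.List.min? (List.zipWith (fun p i => uglies.getD i 0 * p) (q :: lt) pos)
              (fun x => x)).getD 0 = v := by
            cases hmm : PySem.List.min? (List.zipWith (fun p i => uglies.getD i 0 * p) (q :: lt) pos)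
                (fun x => x) with
            | none =>
              have := (PySem.List.min?_eq_none_iff _ _).1 hmm
              rw [this] at hclen
              simp at hclen
            | some m0 =>
              have h1 : m0 ≤ v := by
                have := PySem.List.min?_isMin hmm v (hvc ▸ List.getElem_mem hclen)
                simpa using this
              have h2 : v ≤ m0 := by
                obtain ⟨e, he, rfl⟩ := List.mem_map.1 (hmapc ▸ PySem.List.min?_mem hmm)
                exact hmin e he
              have : m0 = v := le_antisymm h1 h2
              simp [this]
          -- ... at the same position
          have hidx : (List.zipWith (fun p i => uglies.getD i 0 * p) (q :: lt) pos).idxOf v = j := by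
            refine pvIdxOf_eq _ v j hclen hvc ?_
            intro j' hj' hlt
            rw [hcj j' hj']
            have := pvPickMin_leftmost _ _ _ hpick j'
              (by simp only [pvFront, List.length_zipWith] at hj' ⊢; exact hj') hlt
            omega
          have hposj : pos.getD j 0 = i := by
            rw [List.getD_eq_getElem _ _ hjp, hi]
          -- one step of each loop
          have hA1 : pvALoop n (fuel + 1) uglies (pvFront uglies (q :: lt) pos) =
              (let uglies' := if v ≠ uglies.getLastD 0 then uglies ++ [v] else uglies
               if i + 1 < uglies'.length then
                 pvALoop n fuel uglies'
                   ((pvFront uglies (q :: lt) pos).set j (uglies'.getD (i + 1) 0 * p, p, i + 1))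
               else pvALoop n fuel uglies' ((pvFront uglies (q :: lt) pos).eraseIdx j)) := by
            simp only [pvALoop, if_pos hn, hpick]
            split_ifs <;> rfl
          have hB1 : pvBLoop n (fuel + 1) uglies (q :: lt) pos =
              (let uglies' := if v ≠ uglies.getLastD 0 then uglies ++ [v] else uglies
               if uglies'.length ≤ i + 1 then
                 pvBLoop n fuel uglies' ((q :: lt).eraseIdx j) ((pos.set j (i + 1)).eraseIdx j)
               else pvBLoop n fuel uglies' (q :: lt) (pos.set j (i + 1))) := by
            simp only [pvBLoop, if_pos (show ((uglies.length : Int) < n ∧ (q :: lt) ≠ []) from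
              ⟨hn, by simp⟩), hm, hidx, hposj]
            have h3 : (pos.set j (i + 1)).getD j 0 = i + 1 := by
              rw [List.getD_eq_getElem _ _ (by simpa using hjp)]
              simp
            rw [h3]
          rw [hA1, hB1]
          -- the common new uglies list
          simp only
          set U' : List Int := if v ≠ uglies.getLastD 0 then uglies ++ [v] else uglies with hU'
          have hUlen : uglies.length ≤ U'.length := by
            rw [hU']
            split_ifs <;> simp
          have hstable : ∀ i' ∈ pos, U'.getD i' 0 = uglies.getD i' 0 := by
            intro i' hi'
            rw [hU']
            split_ifs with h
            · exact pvGetD_concat_lt _ _ _ (hbound i' hi')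
            · rfl
          by_cases hadv : i + 1 < U'.length
          · rw [if_pos hadv, if_neg (by omega)]
            have hcoupling : (pvFront uglies (q :: lt) pos).set j (U'.getD (i + 1) 0 * p, p, i + 1) =
                pvFront U' (q :: lt) (pos.set j (i + 1)) := by
              show _ = List.zipWith (fun p i => (U'.getD i 0 * p, p, i)) (q :: lt) (pos.set j (i + 1))
              rw [pvZipWith_set_right _ _ _ _ _ hjl, hp]
              show _ = (pvFront U' (q :: lt) pos).set j _
              rw [pvFront_congr uglies U' (q :: lt) pos hstable]
            rw [hcoupling]
            exact ih U' (q :: lt) (pos.set j (i + 1)) (by simpa using hlen)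
              (by
                intro x hx
                rcases List.mem_or_eq_of_mem_set hx with hx' | rfl
                · exact lt_of_lt_of_le (hbound x hx') hUlen
                · exact hadv)
          · rw [if_neg hadv, if_pos (by omega), pvSet_eraseIdx]
            have hcoupling : (pvFront uglies (q :: lt) pos).eraseIdx j =
                pvFront U' ((q :: lt).eraseIdx j) (pos.eraseIdx j) := by
              show _ = List.zipWith (fun p i => (U'.getD i 0 * p, p, i)) ((q :: lt).eraseIdx j) (pos.eraseIdx j)
              rw [pvZipWith_eraseIdx]
              show _ = (pvFront U' (q :: lt) pos).eraseIdx j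
              rw [pvFront_congr uglies U' (q :: lt) pos hstable]
            rw [hcoupling]
            exact ih U' ((q :: lt).eraseIdx j) (pos.eraseIdx j)
              (by rw [List.length_eraseIdx_of_lt hjp, List.length_eraseIdx_of_lt hjl, hlen])
              (by
                intro x hx
                have hx' : x ∈ pos := (List.eraseIdx_sublist pos j).subset hx
                exact lt_of_lt_of_le (hbound x hx') hUlen)
    · have hA : pvALoop n (fuel + 1) uglies (pvFront uglies live pos) = uglies.getLastD 0 := by
        simp [pvALoop, hn]
      have hB : pvBLoop n (fuel + 1) uglies live pos = uglies.getLastD 0 := by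
        simp [pvBLoop, hn]
      rw [hA, hB]

-- ===== VERDICT (by name: the statement is the Claim_ definition above) =====
theorem superUglynumber_spec : Claim_equal_superUglynumber := by
  intro n primes hdom hpre
  obtain ⟨hpne, _⟩ := hpre
  unfold Spec_superUglynumber superUglynumber superUglynumber_alt
  rw [if_neg hpne, if_neg hpne]
  rw [← pvLoop_bisim n _ [1] primes (primes.map fun _ => 0) (by simp)
    (by
      intro i hi
      obtain ⟨a, _, rfl⟩ := List.mem_map.1 hi
      simp)]
  rw [pvFront_init]
  norm_num
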